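-- pv_equiv track=rewrite | github.com/MrBrantCode/unitest_baseline | mut_generate/mist_train_taco/taco_18063/solution.py | check_compressed
-- ===== SOURCE A (Python) =====
-- def check_compressed(S: str, T: str) -> int:
--     c = 0
--     j = 0
--     k = 0
--     for i in range(len(T)):
--         if ord('0') <= ord(T[i]) <= ord('9'):
--             c = c * 10 + int(T[i])
--         else:
--             j = j + c
--             c = 0
--             if j >= len(S):
--                 return 0
--             if S[j] != T[i]:
--                 return 0
--             j += 1
--     j = j + c
--     if j != len(S):
--         return 0
--     return 1
-- ===== SOURCE B (Python) =====
-- def check_compressed(S: str, T: str) -> int: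
--     # Scan T back-to-front: m is the position in S just past the next char to
--     # match (counted from the end); a reversed digit run is rebuilt into its
--     # value c via the positional multiplier p.
--     m = len(S)
--     c = 0
--     p = 1
--     for t in reversed(T):
--         if '0' <= t <= '9':
--             c += p * (ord(t) - 48)
--             p *= 10
--         else:
--             m -= c
--             c = 0
--             p = 1
--             if m <= 0 or S[m - 1] != t:
--                 return 0
--             m -= 1
--     return 1 if m == c else 0
-- ===== Notes on version B (the rewrite author's own statement) =====
-- stated objective: alternative
-- what changed: B scans T back-to-front instead of A's left-to-right pass: it matches characters against S from the end, tracking the end position m and rebuilding reversed digit runs with a positional multiplier p, whereas A accumulates digits left-to-right and advances a start index j.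
import Mathlib
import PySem

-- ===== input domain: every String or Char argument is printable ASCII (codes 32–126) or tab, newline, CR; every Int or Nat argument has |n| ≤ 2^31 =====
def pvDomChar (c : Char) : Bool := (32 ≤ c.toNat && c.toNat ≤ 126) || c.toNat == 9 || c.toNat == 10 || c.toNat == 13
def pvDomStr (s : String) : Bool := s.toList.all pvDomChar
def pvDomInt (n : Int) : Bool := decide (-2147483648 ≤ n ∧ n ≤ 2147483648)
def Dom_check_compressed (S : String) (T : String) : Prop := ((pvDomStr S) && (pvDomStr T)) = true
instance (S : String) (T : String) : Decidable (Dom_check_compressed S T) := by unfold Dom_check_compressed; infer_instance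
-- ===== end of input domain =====

-- B scans T back-to-front (end position m, reversed digit runs rebuilt via a multiplier p) instead of A's left-to-right scan; alternative traversal, same cost.


-- ===== PORT A =====
-- ord('0') <= ord(T[i]) <= ord('9')  (ord '0' = 48, ord '9' = 57)
def pvIsDig (t : Char) : Bool := 48 ≤ t.toNat && t.toNat ≤ 57

-- A's loop over T with state (c, j); the body's `j = j + c; c = 0` before the checks is
-- folded into the indices of the two checks and the recursive call.  S[j] is read only
-- after the `j >= len(S)` guard, so `List.getD` is exact there (the index is in range).
def goA (S : List Char) : List Char → Nat → Nat → Int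
  | [], c, j => if j + c ≠ S.length then 0 else 1
  | t :: rest, c, j =>
    if pvIsDig t then goA S rest (c * 10 + (t.toNat - 48)) j
    else
      if j + c ≥ S.length then 0
      else if S.getD (j + c) ' ' ≠ t then 0
      else goA S rest 0 (j + c + 1)

def check_compressed (S : String) (T : String) : Int := goA S.toList T.toList 0 0

-- ===== PORT B =====
-- B's loop over reversed(T) with state (m : end position in S, may go nonpositive → Int;
-- c : value of the reversed digit run read so far; p : its positional multiplier);
-- the body's `m -= c; c = 0; p = 1` is folded into the guards and the recursive call.
-- S[m-1] is read only after the `m <= 0` guard, so the index (m-c).toNat - 1 is exact.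
def goBwd (S : List Char) : List Char → Int → Nat → Nat → Int
  | [], m, c, _ => if m = (c : Int) then 1 else 0
  | t :: rest, m, c, p =>
    if pvIsDig t then goBwd S rest m (c + p * (t.toNat - 48)) (p * 10)
    else
      if m - (c : Int) ≤ 0 then 0
      else if S.getD ((m - (c : Int)).toNat - 1) ' ' ≠ t then 0
      else goBwd S rest (m - (c : Int) - 1) 0 1

def check_compressed_alt (S : String) (T : String) : Int :=
  goBwd S.toList T.toList.reverse (S.toList.length : Int) 0 1

-- ===== PRECONDITION & SPEC =====
def Spec_check_compressed (S : String) (T : String) (out : Int) : Prop := out = check_compressed_alt S T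
instance (S : String) (T : String) (out : Int) : Decidable (Spec_check_compressed S T out) := by unfold Spec_check_compressed; infer_instance

-- ===== CLAIM (what is proved, stated in full; the proofs are below) =====
def Claim_equal_check_compressed : Prop := ∀ (S : String) (T : String), Dom_check_compressed S T → Spec_check_compressed S T (check_compressed S T)

-- ===== LEMMAS AND PROOFS =====

-- common characterization: the forward matcher with a parametric final check `fin`
def G (S : List Char) : List Char → Nat → Nat → (Nat → Nat → Bool) → Bool
  | [], j, c, fin => fin j c
  | t :: rest, j, c, fin =>
    if pvIsDig t then G S rest j (c * 10 + (t.toNat - 48)) fin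
    else decide (j + c < S.length) && (S.getD (j + c) ' ' == t) && G S rest (j + c + 1) 0 fin

theorem G_append (S : List Char) (as bs : List Char) :
    ∀ j c fin, G S (as ++ bs) j c fin = G S as j c (fun j c => G S bs j c fin) := by
  induction as with
  | nil => intro j c fin; rfl
  | cons a as ih =>
    intro j c fin
    simp only [List.cons_append, G]
    by_cases h : pvIsDig a
    · simp [h, ih]
    · simp [h, ih]

theorem G_congr (S : List Char) (as : List Char) :
    ∀ j c fin1 fin2, (∀ j c, fin1 j c = fin2 j c) → G S as j c fin1 = G S as j c fin2 := by
  induction as with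
  | nil => intro j c fin1 fin2 h; exact h j c
  | cons a as ih =>
    intro j c fin1 fin2 h
    simp only [G]
    by_cases hd : pvIsDig a
    · simp [hd, ih _ _ _ _ h]
    · simp [hd, ih _ _ _ _ h]

theorem G_false (S : List Char) (as : List Char) :
    ∀ j c, G S as j c (fun _ _ => false) = false := by
  induction as with
  | nil => intro j c; rfl
  | cons a as ih =>
    intro j c
    simp only [G]
    by_cases hd : pvIsDig a
    · simp [hd, ih]
    · simp [hd, ih]

theorem goA_eq_G (S : List Char) (ts : List Char) :
    ∀ c j, goA S ts c j =
      if G S ts j c (fun j c => decide (j + c = S.length)) then 1 else 0 := by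
  induction ts with
  | nil =>
    intro c j
    by_cases h : j + c = S.length <;> simp [goA, G, h]
  | cons t rest ih =>
    intro c j
    simp only [goA, G]
    by_cases hd : pvIsDig t
    · simp [hd, ih]
    · simp only [hd, Bool.false_eq_true, if_false]
      by_cases h1 : j + c ≥ S.length
      · have : ¬ (j + c < S.length) := by omega
        simp [h1, this]
      · have hlt : j + c < S.length := by omega
        have hg : S[j + c]? = some S[j + c] := List.getElem?_eq_getElem hlt
        by_cases h2 : S[j + c] = t
        · simp [h1, hlt, h2, ih]
        · simp [h1, hg, h2]

theorem goBwd_eq_G (S : List Char) (u : List Char) :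
    ∀ m c p, m ≤ (S.length : Int) →
      goBwd S u m c p =
        if G S u.reverse 0 0
            (fun j cf => decide ((j : Int) + (cf : Int) * (p : Int) + (c : Int) = m))
          then 1 else 0 := by
  induction u with
  | nil =>
    intro m c p _
    by_cases h : m = (c : Int)
    · simp [goBwd, G, h]
    · simp only [goBwd, List.reverse_nil, G, if_neg h]
      simp
      omega
  | cons t rest ih =>
    intro m c p hm
    simp only [goBwd, List.reverse_cons, G_append]
    by_cases hd : pvIsDig t
    · simp only [hd, if_true]
      rw [ih _ _ _ hm]
      have hpt : ∀ j cf, (fun (j cf : Nat) => G S [t] j cf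
            (fun j cf => decide ((j : Int) + (cf : Int) * (p : Int) + (c : Int) = m))) j cf
          = (fun (j cf : Nat) => decide ((j : Int) + (cf : Int) * ((p * 10 : Nat) : Int)
              + ((c + p * (t.toNat - 48) : Nat) : Int) = m)) j cf := by
        intro j cf
        simp only [G, hd, if_true, decide_eq_decide]
        push_cast
        constructor <;> intro h <;> linear_combination h
      rw [G_congr _ _ _ _ _ _ hpt]
    · simp only [hd, Bool.false_eq_true, if_false]
      by_cases h1 : m - (c : Int) ≤ 0
      · rw [if_pos h1]
        have hfalse : ∀ j cf, G S [t] j cf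
            (fun j cf => decide ((j : Int) + (cf : Int) * (p : Int) + (c : Int) = m))
            = (fun (_ _ : Nat) => false) j cf := by
          intro j cf
          simp only [G, hd, Bool.false_eq_true, if_false]
          simp
          intro _ _
          omega
        rw [G_congr _ _ _ _ _ _ hfalse, G_false]
        simp
      · rw [if_neg h1]
        by_cases h2 : S.getD ((m - (c : Int)).toNat - 1) ' ' = t
        · rw [if_neg (not_not_intro h2)]
          have hm' : m - (c : Int) - 1 ≤ (S.length : Int) := by omega
          rw [ih _ _ _ hm']
          have hpt : ∀ j cf, (fun (j cf : Nat) => G S [t] j cf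
                (fun j cf => decide ((j : Int) + (cf : Int) * (p : Int) + (c : Int) = m))) j cf
              = (fun (j cf : Nat) => decide ((j : Int) + (cf : Int) * ((1 : Nat) : Int)
                  + ((0 : Nat) : Int) = m - (c : Int) - 1)) j cf := by
            intro j cf
            simp only [G, hd, Bool.false_eq_true, if_false]
            by_cases he : ((j + cf + 1 : Nat) : Int) + 0 * (p : Int) + (c : Int) = m
            · have hidx : j + cf = (m - (c : Int)).toNat - 1 := by omega
              have hlt : j + cf < S.length := by omega
              have hg : S[j + cf]? = some S[j + cf] := List.getElem?_eq_getElem hlt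
              have heq : S[j + cf] = t := by
                rw [← List.getD_eq_getElem S ' ' hlt, hidx]; exact h2
              simp [hlt, heq]
              omega
            · have he' : ¬ ((j : Int) + (cf : Int) + 1 + (c : Int) = m) := by
                push_cast at he; omega
              have hfin' : ¬ ((j : Int) + (cf : Int) = m - (c : Int) - 1) := by omega
              simp [he', hfin']
          rw [G_congr _ _ _ _ _ _ hpt]
        · rw [if_pos h2]
          have hfalse : ∀ j cf, G S [t] j cf
              (fun j cf => decide ((j : Int) + (cf : Int) * (p : Int) + (c : Int) = m))
              = (fun (_ _ : Nat) => false) j cf := by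
            intro j cf
            simp only [G, hd, Bool.false_eq_true, if_false]
            by_cases he : ((j + cf + 1 : Nat) : Int) + 0 * (p : Int) + (c : Int) = m
            · have hidx : j + cf = (m - (c : Int)).toNat - 1 := by omega
              have hlt : j + cf < S.length := by omega
              have hg : S[j + cf]? = some S[j + cf] := List.getElem?_eq_getElem hlt
              have hne : ¬ (S[j + cf] = t) := by
                rw [← List.getD_eq_getElem S ' ' hlt, hidx]; exact h2
              simp [hg, hne]
            · simp
              intro _ _
              omega
          rw [G_congr _ _ _ _ _ _ hfalse, G_false]
          simp

-- ===== VERDICT (by name: the statement is the Claim_ definition above) =====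
theorem check_compressed_spec : Claim_equal_check_compressed := by
  intro S T _
  unfold Spec_check_compressed check_compressed check_compressed_alt
  rw [goA_eq_G, goBwd_eq_G S.toList _ _ _ _ (le_refl _), List.reverse_reverse]
  have hpt : ∀ j c, (fun (j c : Nat) => decide (j + c = S.toList.length)) j c
      = (fun (j c : Nat) => decide ((j : Int) + (c : Int) * ((1 : Nat) : Int)
          + ((0 : Nat) : Int) = (S.toList.length : Int))) j c := by
    intro j c
    simp only [decide_eq_decide]
    push_cast
    omega
  rw [G_congr _ _ _ _ _ _ hpt]
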